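-- pv_equiv track=rewrite | github.com/olehkupriienko/Self-study | Codewars/!OLD/035_Highest Scoring Word.py | high2
-- ===== SOURCE A (Python) =====
-- def high2(x):
--     alfabet = 'abcdefghijklmnopqrstuvwxyz'
--     result = []
--     for i in x.split():
--         total = 0
--         for j in i:
--             total += alfabet.index(j) + 1
--         result.append(total)
--     max_index = result.index(max(result))
--     return x.split()[max_index]
-- ===== SOURCE B (Python) =====
-- def high2(x):
--     # Single character-level scan: no split(), no score list, no .index();
--     # word boundaries and scores are detected on the fly.
--     best = None        # (word, score) of best-scoring word so far; first word wins ties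
--     cur = []
--     cur_score = 0
--     for c in x:
--         if c.isspace():
--             if cur:
--                 if best is None or best[1] < cur_score:
--                     best = (''.join(cur), cur_score)
--                 cur = []
--                 cur_score = 0
--         else:
--             cur.append(c)
--             cur_score += ord(c) - 96
--     if cur:
--         if best is None or best[1] < cur_score:
--             best = (''.join(cur), cur_score)
--     if best is None:
--         raise ValueError("high2() arg contains no words")
--     return best[0]
-- ===== Notes on version B (the rewrite author's own statement) =====
-- stated objective: alternative
-- what changed: B drops split() entirely: a single character-level scan detects word boundaries itself, accumulating the current word and its score and keeping only the running best (word, score) pair, instead of A's split + parallel score list + max() + .index() + second split().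
import Mathlib
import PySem

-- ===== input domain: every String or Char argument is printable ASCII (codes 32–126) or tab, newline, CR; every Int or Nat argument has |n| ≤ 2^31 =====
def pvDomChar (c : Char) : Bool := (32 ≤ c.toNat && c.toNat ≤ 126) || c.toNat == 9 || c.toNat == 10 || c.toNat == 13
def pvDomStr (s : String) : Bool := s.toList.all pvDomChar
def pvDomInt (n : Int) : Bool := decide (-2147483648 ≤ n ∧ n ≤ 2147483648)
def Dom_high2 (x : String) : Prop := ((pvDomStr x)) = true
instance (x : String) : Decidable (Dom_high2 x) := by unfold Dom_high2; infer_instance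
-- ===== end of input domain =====

-- B replaces A's split + per-word score list + max() + .index() + second split() by one
-- character-level scan that detects word boundaries itself and keeps only the running best word.

-- ===== PORT A =====
-- alfabet.index(j) raises ValueError when j is absent; Pre_high2 excludes those inputs,
-- and on the admitted inputs PySem.Chars.find (= str.find) equals str.index exactly.
def high2 (x : String) : String :=
  let alfabet : String := "abcdefghijklmnopqrstuvwxyz"
  let result : List Int :=
    (PySem.Str.split₀ x).map (fun i =>
      i.toList.foldl (fun total j => total + (PySem.Chars.find alfabet.toList [j] + 1)) 0)
  let mx : Int := (PySem.List.max? result (fun v => v)).getD 0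
  let maxIndex : Nat := (PySem.List.index? result mx).getD 0
  (PySem.List.pyGet? (PySem.Str.split₀ x) (maxIndex : Int)).getD ""

-- ===== PORT B =====
-- `best is None or best[1] < cur_score: best = (''.join(cur), cur_score)` of Source B
def updB (b : Option (String × Int)) (cur : List Char) (sc : Int) : Option (String × Int) :=
  match b with
  | none => some (String.ofList cur, sc)
  | some (bw, bs) => if bs < sc then some (String.ofList cur, sc) else some (bw, bs)

-- loop body of Source B: on whitespace close the current word (if any), else extend it
def stepB (st : Option (String × Int) × List Char × Int) (c : Char) :
    Option (String × Int) × List Char × Int :=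
  if PySem.Chars.isspace c then
    if st.2.1.isEmpty then st else (updB st.1 st.2.1 st.2.2, [], 0)
  else (st.1, st.2.1 ++ [c], st.2.2 + ((c.toNat : Int) - 96))

-- the `if cur:` flush after the loop in Source B
def finB (st : Option (String × Int) × List Char × Int) : Option (String × Int) :=
  if st.2.1.isEmpty then st.1 else updB st.1 st.2.1 st.2.2

def high2_alt (x : String) : String :=
  ((finB (x.toList.foldl stepB (none, [], 0))).map Prod.fst).getD ""

-- ===== PRECONDITION & SPEC =====
-- A raises ValueError when x.split() is empty (max of []) or when any character of a word is
-- not a lowercase letter a-z (alfabet.index); Pre_ admits exactly the inputs where A returns.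
def Pre_high2 (x : String) : Prop :=
  PySem.Str.split₀ x ≠ [] ∧
  (PySem.Str.split₀ x).all (fun w => w.toList.all (fun c => 'a' ≤ c && c ≤ 'z')) = true
instance (x : String) : Decidable (Pre_high2 x) := by unfold Pre_high2; infer_instance
def pvWitness_high2 : String := "man i need a taxi up to ubud"

def Spec_high2 (x : String) (out : String) : Prop := out = high2_alt x
instance (x : String) (out : String) : Decidable (Spec_high2 x out) := by unfold Spec_high2; infer_instance

-- ===== CLAIM (what is proved, stated in full; the proofs are below) =====
def Claim_equal_high2 : Prop := ∀ (x : String), Dom_high2 x → Pre_high2 x → Spec_high2 x (high2 x)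

-- ===== LEMMAS AND PROOFS =====

-- B's word score, on char lists and on strings
def scoreC (cs : List Char) : Int := (cs.map (fun c => (c.toNat : Int) - 96)).sum
def scoreW (w : String) : Int := scoreC w.toList

lemma scoreC_append (cs : List Char) (c : Char) :
    scoreC cs + ((c.toNat : Int) - 96) = scoreC (cs ++ [c]) := by
  simp [scoreC]

-- position of a lowercase letter in the alphabet string
lemma alfa_find {c : Char} (h1 : 'a' ≤ c) (h2 : c ≤ 'z') :
    PySem.Chars.find "abcdefghijklmnopqrstuvwxyz".toList [c] = (c.toNat : Int) - 97 := by
  have hc := Char.ofNat_toNat c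
  have h1' : 97 ≤ c.toNat := Nat.succ_le_of_lt h1
  have h2' : c.toNat ≤ 122 := h2
  rw [← hc]
  generalize hgen : c.toNat = n at *
  interval_cases n <;> decide

-- A's per-word total equals B's per-word score on lowercase words
lemma score_eq (w : String)
    (hw : ∀ c ∈ w.toList, 'a' ≤ c ∧ c ≤ 'z') :
    w.toList.foldl (fun total j =>
        total + (PySem.Chars.find "abcdefghijklmnopqrstuvwxyz".toList [j] + 1)) 0
      = scoreW w := by
  rw [PySem.List.foldl_add]
  simp only [zero_add, scoreW, scoreC]
  apply congrArg
  apply List.map_congr_left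
  intro c hc
  rw [alfa_find (hw c hc).1 (hw c hc).2]
  ring

-- A's pick (index of the first maximal score) equals the running-best fold
lemma pick_eq (s : String → Int) : ∀ (t : List String) (h : String),
    (PySem.List.pyGet? (h :: t)
        (((PySem.List.index? ((h :: t).map s)
            ((PySem.List.max? ((h :: t).map s) (fun v => v)).getD 0)).getD 0 : Nat) : Int)).getD ""
      = t.foldl (fun b w => if s b < s w then w else b) h := by
  intro t
  induction t with
  | nil =>
      intro h
      simp [PySem.List.max?]
  | cons w t ih =>
      intro h
      rw [List.foldl_cons, ← ih (if s h < s w then w else h)]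
      have hmax : PySem.List.max? ((h :: w :: t).map s) (fun v => v)
          = PySem.List.max? (((if s h < s w then w else h) :: t).map s) (fun v => v) := by
        by_cases hc : s h < s w <;> simp [PySem.List.max?, hc]
      obtain ⟨m, hm⟩ : ∃ m, PySem.List.max? (((if s h < s w then w else h) :: t).map s)
          (fun v => v) = some m := by
        rcases hq : PySem.List.max? (((if s h < s w then w else h) :: t).map s)
            (fun v => v) with _ | m
        · rw [PySem.List.max?_eq_none_iff] at hq; simp at hq
        · exact ⟨m, rfl⟩
      have hmem : m ∈ ((if s h < s w then w else h) :: t).map s := PySem.List.max?_mem hm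
      have hub : ∀ y ∈ ((if s h < s w then w else h) :: t).map s, y ≤ m :=
        PySem.List.max?_isMax hm
      rw [hmax, hm]
      simp only [Option.getD_some]
      by_cases hc : s h < s w
      · simp only [if_pos hc, List.map_cons] at *
        have hhm : s h ≠ m := by
          have := hub (s w) (by simp)
          omega
        obtain ⟨k, hk⟩ : ∃ k, PySem.List.index? (s w :: t.map s) m = some k := by
          have hms : m ∈ s w :: t.map s := by simpa using hmem
          rw [← PySem.List.index?_isSome_iff] at hms
          exact Option.isSome_iff_exists.mp hms
        rw [PySem.List.index?_cons_of_ne _ hhm, hk]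
        simp
      · simp only [if_neg hc, List.map_cons] at *
        by_cases hhm : s h = m
        · rw [hhm, PySem.List.index?_cons_self, PySem.List.index?_cons_self]
          simp
        · have hwm : s w ≠ m := by
            have h1 := hub (s h) (by simp)
            omega
          obtain ⟨k, hk⟩ : ∃ k, PySem.List.index? (t.map s) m = some k := by
            have hms : m ∈ t.map s := by
              rcases (by simpa using hmem : m = s h ∨ m ∈ t.map s) with h' | h'
              · exact absurd h'.symm hhm
              · exact h'
            rw [← PySem.List.index?_isSome_iff] at hms
            exact Option.isSome_iff_exists.mp hms
          rw [PySem.List.index?_cons_of_ne _ hhm, PySem.List.index?_cons_of_ne _ hwm,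
            PySem.List.index?_cons_of_ne _ hhm, hk]
          simp [PySem.List.pyGet?_natCast]
          rw [show ((k : Int) + 1 + 1) = ((k + 1 + 1 : Nat) : Int) by push_cast; ring,
            PySem.List.pyGet?_natCast]
          simp

-- definitional unfoldings of split₀.go (by rfl), to steer rewriting
lemma go_nil (cur : List Char) (acc : List (List Char)) :
    PySem.Chars.split₀.go [] cur acc
      = if cur.isEmpty then acc.reverse else (cur.reverse :: acc).reverse := rfl

lemma go_cons (c : Char) (rest cur : List Char) (acc : List (List Char)) :
    PySem.Chars.split₀.go (c :: rest) cur acc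
      = if PySem.Chars.isspace c then
          (if cur.isEmpty then PySem.Chars.split₀.go rest [] acc
           else PySem.Chars.split₀.go rest [] (cur.reverse :: acc))
        else PySem.Chars.split₀.go rest (c :: cur) acc := rfl

-- split₀.go's accumulator prepends finished words
lemma go_acc : ∀ (s cur : List Char) (acc : List (List Char)),
    PySem.Chars.split₀.go s cur acc = acc.reverse ++ PySem.Chars.split₀.go s cur [] := by
  intro s
  induction s with
  | nil =>
      intro cur acc
      rw [go_nil, go_nil]
      by_cases h : cur.isEmpty <;> simp [h]
  | cons c rest ih =>
      intro cur acc
      rw [go_cons, go_cons]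
      by_cases hs : PySem.Chars.isspace c
      · by_cases h : cur.isEmpty
        · simp only [hs, h, if_true]
          exact ih [] acc
        · simp only [hs, h, if_true, Bool.false_eq_true, if_false]
          rw [ih [] (cur.reverse :: acc), ih [] [cur.reverse]]
          simp
      · simp only [hs, Bool.false_eq_true, if_false]
        exact ih (c :: cur) acc

-- B's character scan, started from any partial word, computes the running-best fold
-- over the words split₀ would produce from the same state
lemma scan_eq : ∀ (s cur : List Char) (b : Option (String × Int)),
    finB (s.foldl stepB (b, cur, scoreC cur))
      = (PySem.Chars.split₀.go s cur.reverse []).foldl (fun b w => updB b w (scoreC w)) b := by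
  intro s
  induction s with
  | nil =>
      intro cur b
      rw [go_nil]
      by_cases h : cur.isEmpty
      · have : cur = [] := by simpa using h
        subst this
        simp [finB]
      · have h' : cur.reverse.isEmpty = (false : Bool) := by
          simp only [List.isEmpty_reverse]; simpa using h
        simp [finB, h, h']
  | cons c rest ih =>
      intro cur b
      rw [go_cons]
      by_cases hs : PySem.Chars.isspace c
      · by_cases h : cur.isEmpty
        · have : cur = [] := by simpa using h
          subst this
          simp only [List.foldl_cons, stepB, hs, if_true, List.isEmpty_nil, List.reverse_nil]
          exact ih [] b
        · have h' : cur.reverse.isEmpty = (false : Bool) := by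
            simp only [List.isEmpty_reverse]; simpa using h
          simp only [List.foldl_cons, stepB, hs, if_true, h, h', Bool.false_eq_true, if_false]
          have hz : (0 : Int) = scoreC [] := by simp [scoreC]
          rw [hz, ih [] (updB b cur (scoreC cur))]
          simp only [List.reverse_nil, List.reverse_reverse]
          rw [go_acc rest [] [cur]]
          simp
      · simp only [List.foldl_cons, stepB, hs, Bool.false_eq_true, if_false]
        rw [scoreC_append, ih (cur ++ [c]) b]
        simp

-- folding updB from a known best is the plain running-best fold on words
lemma fold_upd_some : ∀ (t : List (List Char)) (bw : List Char),
    t.foldl (fun b w => updB b w (scoreC w)) (some (String.ofList bw, scoreC bw))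
      = some (String.ofList (t.foldl (fun b w => if scoreC b < scoreC w then w else b) bw),
              scoreC (t.foldl (fun b w => if scoreC b < scoreC w then w else b) bw)) := by
  intro t
  induction t with
  | nil => intro bw; rfl
  | cons w t ih =>
      intro bw
      have h1 : updB (some (String.ofList bw, scoreC bw)) w (scoreC w)
          = some (String.ofList (if scoreC bw < scoreC w then w else bw),
                  scoreC (if scoreC bw < scoreC w then w else bw)) := by
        by_cases hc : scoreC bw < scoreC w <;> simp [updB, hc]
      rw [List.foldl_cons, h1]
      conv_rhs => rw [List.foldl_cons]
      by_cases hc : scoreC bw < scoreC w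
      · simp only [if_pos hc]; exact ih w
      · simp only [if_neg hc]; exact ih bw

-- the String-level running-best fold over mapped words is the char-level one
lemma fold_map_ofList : ∀ (t : List (List Char)) (h : List Char),
    (t.map String.ofList).foldl (fun b w => if scoreW b < scoreW w then w else b)
        (String.ofList h)
      = String.ofList (t.foldl (fun b w => if scoreC b < scoreC w then w else b) h) := by
  intro t
  induction t with
  | nil => intro h; rfl
  | cons w t ih =>
      intro h
      have hsc : ∀ cs : List Char, scoreW (String.ofList cs) = scoreC cs := by
        intro cs; simp [scoreW]
      simp only [List.map_cons, List.foldl_cons, hsc]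
      by_cases hc : scoreC h < scoreC w
      · simp [hc, ih]
      · simp [hc, ih]

-- ===== VERDICT (by name: the statement is the Claim_ definition above) =====
theorem high2_spec : Claim_equal_high2 := by
  intro x _ hp
  obtain ⟨hne, hlow⟩ := hp
  obtain ⟨wh, wt, hws⟩ : ∃ wh wt, PySem.Chars.split₀ x.toList = wh :: wt := by
    rcases hq : PySem.Chars.split₀ x.toList with _ | ⟨wh, wt⟩
    · exact absurd (by simp [PySem.Str.split₀, hq]) hne
    · exact ⟨wh, wt, rfl⟩
  have hsplit : PySem.Str.split₀ x = (wh :: wt).map String.ofList := by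
    simp [PySem.Str.split₀, hws]
  -- A's side
  simp only [Spec_high2, high2]
  rw [hsplit]
  have hmap : ((wh :: wt).map String.ofList).map (fun i =>
        i.toList.foldl (fun total j =>
          total + (PySem.Chars.find "abcdefghijklmnopqrstuvwxyz".toList [j] + 1)) 0)
      = ((wh :: wt).map String.ofList).map scoreW := by
    apply List.map_congr_left
    intro w hw
    exact score_eq w (fun c hcw => by
      have := List.all_eq_true.mp hlow w (by rw [hsplit]; exact hw)
      have := List.all_eq_true.mp this c hcw
      simpa using this)
  rw [show ((wh :: wt).map String.ofList) = String.ofList wh :: wt.map String.ofList by simp]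
    at hmap ⊢
  rw [hmap, pick_eq scoreW (wt.map String.ofList) (String.ofList wh), fold_map_ofList]
  -- B's side
  have hb := scan_eq x.toList [] none
  simp only [List.reverse_nil] at hb
  have hz : (0 : Int) = scoreC [] := by simp [scoreC]
  unfold high2_alt
  rw [hz, hb]
  unfold PySem.Chars.split₀ at hws
  rw [hws, List.foldl_cons, show updB none wh (scoreC wh) = some (String.ofList wh, scoreC wh)
      from rfl, fold_upd_some]
  simp
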